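-- pv_equiv track=rewrite | github.com/siddheshkadane01/Site-Reliability-Server | inference.py | silenced_state
-- ===== SOURCE A (Python) =====
-- from typing import Any
--
-- def silenced_state(obs: dict[str, Any], service: str) -> tuple[int, int]:
--     total = 0
--     open_alerts = 0
--     for alert in obs.get("active_alerts", []):
--         if alert["service"] != service:
--             continue
--         total += 1
--         if not alert.get("silenced", False):
--             open_alerts += 1
--     return total, open_alerts
-- ===== SOURCE B (Python) =====
-- def silenced_state(obs, service):
--     # Group-by: one pass tallies (total, open) for EVERY service in a dict,
--     # then the answer is a single lookup (0, 0) if the service never occurs.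
--     counts = {}
--     for alert in obs.get("active_alerts", []):
--         svc = alert["service"]
--         t, o = counts.get(svc, (0, 0))
--         counts[svc] = (t + 1, o + (0 if alert.get("silenced", False) else 1))
--     return counts.get(service, (0, 0))
-- ===== Notes on version B (the rewrite author's own statement) =====
-- stated objective: alternative
-- what changed: Replaces A's filter-by-service counting loop with a group-by: one pass builds a dict of (total, open) tallies for every service, and the answer is a single dict lookup with (0, 0) default.
import Mathlib
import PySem

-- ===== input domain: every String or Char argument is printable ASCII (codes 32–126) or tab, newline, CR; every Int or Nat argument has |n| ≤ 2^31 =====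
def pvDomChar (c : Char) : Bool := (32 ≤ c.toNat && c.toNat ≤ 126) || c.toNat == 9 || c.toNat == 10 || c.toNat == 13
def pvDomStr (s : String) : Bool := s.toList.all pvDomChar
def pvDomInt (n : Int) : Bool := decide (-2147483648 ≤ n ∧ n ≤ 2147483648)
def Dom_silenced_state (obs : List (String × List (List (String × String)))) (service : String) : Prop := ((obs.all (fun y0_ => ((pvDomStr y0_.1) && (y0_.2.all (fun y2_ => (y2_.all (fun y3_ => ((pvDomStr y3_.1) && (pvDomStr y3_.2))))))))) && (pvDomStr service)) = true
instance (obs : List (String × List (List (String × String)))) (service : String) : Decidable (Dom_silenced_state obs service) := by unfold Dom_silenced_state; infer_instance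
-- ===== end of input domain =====

-- B replaces A's filter-by-service counting loop with a group-by dict of per-service tallies plus one final lookup; objective: alternative.
-- Pre_ excludes inputs where some alert of the "active_alerts" list lacks a "service" key (both Pythons raise KeyError there).

-- ===== PORT A =====
-- alert.get("silenced", False): truthy iff the key is present with a nonempty string value
def pvSilencedTruthy (alert : List (String × String)) : Bool :=
  match (PySem.Dict.mk alert).get? "silenced" with
  | none => false
  | some s => s != ""

def silenced_state (obs : List (String × List (List (String × String)))) (service : String) : Int × Int :=
  let alerts := ((PySem.Dict.mk obs).get? "active_alerts").getD []
  alerts.foldl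
    (fun (st : Int × Int) alert =>
      match (PySem.Dict.mk alert).get? "service" with
      | none => st  -- KeyError in Python; excluded by Pre_
      | some sv =>
        if sv != service then st
        else (st.1 + 1, if pvSilencedTruthy alert then st.2 else st.2 + 1))
    (0, 0)

-- ===== PORT B =====
def silenced_state_alt (obs : List (String × List (List (String × String)))) (service : String) : Int × Int :=
  let alerts := ((PySem.Dict.mk obs).get? "active_alerts").getD []
  let counts : PySem.Dict String (Int × Int) :=
    alerts.foldl
      (fun counts alert =>
        match (PySem.Dict.mk alert).get? "service" with
        | none => counts  -- KeyError in Python; excluded by Pre_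
        | some svc =>
          let to_ := counts.getD svc (0, 0)
          counts.insert svc (to_.1 + 1, to_.2 + (if pvSilencedTruthy alert then 0 else 1)))
      PySem.Dict.empty
  counts.getD service (0, 0)

-- ===== PRECONDITION & SPEC =====
def Pre_silenced_state (obs : List (String × List (List (String × String)))) (service : String) : Prop :=
  ∀ a ∈ ((PySem.Dict.mk obs).get? "active_alerts").getD [], ((PySem.Dict.mk a).get? "service").isSome
instance (obs : List (String × List (List (String × String)))) (service : String) : Decidable (Pre_silenced_state obs service) := by unfold Pre_silenced_state; infer_instance

def pvWitness_silenced_state : (List (String × List (List (String × String)))) × String :=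
  ([("active_alerts", [[("service", "db")], [("service", "db"), ("silenced", "1")], [("service", "web")]])], "db")

def Spec_silenced_state (obs : List (String × List (List (String × String)))) (service : String) (out : Int × Int) : Prop := out = silenced_state_alt obs service
instance (obs : List (String × List (List (String × String)))) (service : String) (out : Int × Int) : Decidable (Spec_silenced_state obs service out) := by unfold Spec_silenced_state; infer_instance

-- ===== CLAIM (what is proved, stated in full; the proofs are below) =====
def Claim_equal_silenced_state : Prop := ∀ (obs : List (String × List (List (String × String)))) (service : String), Dom_silenced_state obs service → Pre_silenced_state obs service → Spec_silenced_state obs service (silenced_state obs service)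

-- ===== LEMMAS AND PROOFS =====
-- loop invariant: reading B's group-by dict at `service` after folding any alert list
-- equals running A's fused counting loop from the value the dict held for `service` before.
theorem groupby_loop (service : String) (alerts : List (List (String × String)))
    (d : PySem.Dict String (Int × Int)) :
    ((alerts.foldl
        (fun counts alert =>
          match (PySem.Dict.mk alert).get? "service" with
          | none => counts
          | some svc =>
            let to_ := counts.getD svc (0, 0)
            counts.insert svc (to_.1 + 1, to_.2 + (if pvSilencedTruthy alert then 0 else 1)))
        d).getD service (0, 0))
    = alerts.foldl
        (fun (st : Int × Int) alert =>
          match (PySem.Dict.mk alert).get? "service" with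
          | none => st
          | some sv =>
            if sv != service then st
            else (st.1 + 1, if pvSilencedTruthy alert then st.2 else st.2 + 1))
        (d.getD service (0, 0)) := by
  induction alerts generalizing d with
  | nil => rfl
  | cons a rest ih =>
    simp only [List.foldl_cons]
    cases hsv : (PySem.Dict.mk a).get? "service" with
    | none => exact ih d
    | some sv =>
      rw [ih]
      by_cases hse : sv = service
      · subst hse
        rw [PySem.Dict.getD_insert_self]
        by_cases hsil : pvSilencedTruthy a <;> simp [hsil]
      · rw [PySem.Dict.getD_insert_of_ne _ _ _ (Ne.symm hse)]
        have : (sv != service) = true := by simp [hse]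
        simp [this]

-- ===== VERDICT (by name: the statement is the Claim_ definition above) =====
theorem silenced_state_spec : Claim_equal_silenced_state := by
  intro obs service _ _
  unfold Spec_silenced_state silenced_state silenced_state_alt
  rw [groupby_loop]
  rfl
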